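-- pv_equiv track=rewrite | github.com/oliminforcanarias/Soluciones-OITF | III-OITF/p4/p4.py | assign_sections
-- ===== SOURCE A (Python) =====
-- def is_consec_fib(m, n):
--     a, b = 1, 1
--     while a <= max(m, n):
--         if (a == m and b == n) or (a == n and b == m):
--             return True
--         a, b = b, a + b
--     return False
--
-- def assign_sections(n):
--     sec1 = []
--     sec2 = []
--     last_s1 = None
--
--     for num in range(1, n + 1):
--         if last_s1 is None:
--             sec1.append(num)
--             last_s1 = num
--         elif is_consec_fib(last_s1, num):
--             sec1.append(num)
--             last_s1 = num
--         else:
--             sec2.append(num)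
--
--     return sec1, sec2
-- ===== SOURCE B (Python) =====
-- def assign_sections(n):
--     sec1 = []
--     a, b = 1, 2
--     while a <= n:
--         sec1.append(a)
--         a, b = b, a + b
--     fibs = set(sec1)
--     sec2 = [x for x in range(1, n + 1) if x not in fibs]
--     return sec1, sec2
-- ===== Notes on version B (the rewrite author's own statement) =====
-- stated objective: faster
-- what changed: B generates sec1 directly from the Fibonacci recurrence (a,b=1,2; while a<=n) instead of testing every integer 1..n with the per-number is_consec_fib scan, and builds sec2 by one filtering pass over range(1,n+1) against a set of those Fibonacci values.
import Mathlib
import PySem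

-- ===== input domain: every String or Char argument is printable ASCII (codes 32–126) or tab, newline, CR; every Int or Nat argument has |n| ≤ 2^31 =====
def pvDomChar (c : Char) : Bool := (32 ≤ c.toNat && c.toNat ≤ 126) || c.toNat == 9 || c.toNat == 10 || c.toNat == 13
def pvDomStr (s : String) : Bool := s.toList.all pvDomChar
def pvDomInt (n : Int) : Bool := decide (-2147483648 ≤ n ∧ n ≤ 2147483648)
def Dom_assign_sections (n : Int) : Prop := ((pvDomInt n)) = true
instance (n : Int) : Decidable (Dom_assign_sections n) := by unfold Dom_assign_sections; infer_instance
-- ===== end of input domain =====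

-- B replaces A's per-number consecutive-Fibonacci scan by generating sec1 from the
-- Fibonacci recurrence directly and filtering 1..n against a set of those values (faster).


-- ===== PORT A =====
-- while loop of is_consec_fib; the proof arguments only justify termination (Python's
-- loop terminates since a grows; from the start (1,1) the invariants 1 ≤ a ≤ b ≤ 2a hold)
def fibLoopA (m n a b : Int) (h1 : 1 ≤ a) (h2 : a ≤ b) (h3 : b ≤ 2 * a) : Bool :=
  if a ≤ max m n then
    if (a = m ∧ b = n) ∨ (a = n ∧ b = m) then true
    else fibLoopA m n b (a + b) (by omega) (by omega) (by omega)
  else false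
termination_by (3 * max m n + 4 - a - b).toNat
decreasing_by omega

def is_consec_fib (m n : Int) : Bool :=
  fibLoopA m n 1 1 (by omega) (by omega) (by omega)

-- one iteration of A's for-loop body over the state (sec1, sec2, last_s1)
def stepA (st : List Int × List Int × Option Int) (num : Int) : List Int × List Int × Option Int :=
  match st with
  | (s1, s2, none) => (s1 ++ [num], s2, some num)
  | (s1, s2, some l) =>
      if is_consec_fib l num then (s1 ++ [num], s2, some num)
      else (s1, s2 ++ [num], some l)

def assign_sections (n : Int) : List Int × List Int :=
  match (PySem.List.pyRange 1 (n + 1) 1).foldl stepA ([], [], none) with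
  | (s1, s2, _) => (s1, s2)

-- ===== PORT B =====
-- B's while loop: collect the Fibonacci values a = 1, 2, 3, 5, 8, … while a ≤ n
def fibGen (n a b : Int) (h1 : 1 ≤ a) (h2 : a < b) : List Int :=
  if a ≤ n then a :: fibGen n b (a + b) (by omega) (by omega)
  else []
termination_by (n + 1 - a).toNat
decreasing_by omega

def assign_sections_alt (n : Int) : List Int × List Int :=
  let sec1 := fibGen n 1 2 (by omega) (by omega)
  let fibs := PySem.Set.ofList sec1
  let sec2 := (PySem.List.pyRange 1 (n + 1) 1).filter (fun x => !(fibs.contains x))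
  (sec1, sec2)

-- ===== PRECONDITION & SPEC =====
def Spec_assign_sections (n : Int) (out : List Int × List Int) : Prop := out = assign_sections_alt n
instance (n : Int) (out : List Int × List Int) : Decidable (Spec_assign_sections n out) := by unfold Spec_assign_sections; infer_instance

-- ===== CLAIM (what is proved, stated in full; the proofs are below) =====
def Claim_equal_assign_sections : Prop := ∀ (n : Int), Dom_assign_sections n → Spec_assign_sections n (assign_sections n)

-- ===== LEMMAS AND PROOFS =====

-- reachability along the Fibonacci step (a,b) ↦ (b, a+b), head-first
inductive Reach : Int × Int → Int × Int → Prop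
  | refl (p : Int × Int) : Reach p p
  | head (p q : Int × Int) : Reach (p.2, p.1 + p.2) q → Reach p q

lemma reach_inv {p q : Int × Int} (h1 : 1 ≤ p.1) (h2 : p.1 < p.2) (h : Reach p q) :
    1 ≤ q.1 ∧ q.1 < q.2 := by
  induction h with
  | refl => exact ⟨h1, h2⟩
  | head p q h ih => exact ih (by simpa using by omega) (by simpa using by omega)

lemma reach_mono {p q : Int × Int} (h1 : 1 ≤ p.1) (h2 : p.1 ≤ p.2) (h : Reach p q) :
    p.1 ≤ q.1 := by
  induction h with
  | refl => exact le_refl _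
  | head p q h ih =>
      have := ih (by simp; omega) (by simp; omega)
      simp at this; omega

lemma reach_strict {p q : Int × Int} (h1 : 1 ≤ p.1) (h2 : p.1 < p.2) (h : Reach p q) :
    p = q ∨ p.2 ≤ q.1 := by
  induction h with
  | refl => exact Or.inl rfl
  | head p q h ih =>
      right
      rcases ih (by simp; omega) (by simp; omega) with h' | h'
      · rw [← h']
      · simp at h'; omega

lemma reach_tail {p q : Int × Int} (h : Reach p q) : Reach p (q.2, q.1 + q.2) := by
  induction h with
  | refl p => exact Reach.head p _ (Reach.refl _)
  | head p q h ih => exact Reach.head p _ ih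

lemma reach_total {s p q : Int × Int} (hp : Reach s p) (hq : Reach s q) :
    Reach p q ∨ Reach q p := by
  induction hp with
  | refl => exact Or.inl hq
  | head s p h ih =>
      cases hq with
      | refl => exact Or.inr (Reach.head _ _ h)
      | head _ _ hq' => exact ih hq'

lemma reach12_inv {f g : Int} (h : Reach (1, 2) (f, g)) : 1 ≤ f ∧ f < g := by
  exact reach_inv (by norm_num) (by norm_num) h

lemma reach_uniq {f g y : Int} (hg : Reach (1, 2) (f, g)) (hy : Reach (1, 2) (f, y)) :
    g = y := by
  obtain ⟨hf1, hfg⟩ := reach12_inv hg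
  obtain ⟨_, hfy⟩ := reach12_inv hy
  rcases reach_total hg hy with h | h
  · rcases reach_strict (p := (f, g)) (by simpa) (by simpa) h with h' | h'
    · simpa using h'
    · simp at h'; omega
  · rcases reach_strict (p := (f, y)) (by simpa) (by simpa) h with h' | h'
    · simpa using h'.symm
    · simp at h'; omega

-- characterization of A's while loop
lemma fibLoopA_iff (m n a b : Int) (h1 : 1 ≤ a) (h2 : a ≤ b) (h3 : b ≤ 2 * a) :
    fibLoopA m n a b h1 h2 h3 = true ↔
      ∃ p, Reach (a, b) p ∧ p.1 ≤ max m n ∧ ((p.1 = m ∧ p.2 = n) ∨ (p.1 = n ∧ p.2 = m)) := by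
  fun_induction fibLoopA with
  | case1 a b h1 h2 h3 hle hmatch =>
      simp only [true_iff]
      exact ⟨(a, b), Reach.refl _, hle, hmatch⟩
  | case2 a b h1 h2 h3 hle hmatch ih =>
      rw [ih]
      constructor
      · rintro ⟨p, hr, hp1, hp2⟩
        exact ⟨p, Reach.head (a, b) p hr, hp1, hp2⟩
      · rintro ⟨p, hr, hp1, hp2⟩
        cases hr with
        | refl => exact absurd hp2 hmatch
        | head _ _ h => exact ⟨p, h, hp1, hp2⟩
  | case3 a b h1 h2 h3 hgt =>
      simp only [Bool.false_eq_true, false_iff]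
      rintro ⟨p, hr, hp1, _⟩
      have := reach_mono (p := (a, b)) (by simpa) (by simpa) hr
      omega

-- Reach from (1,1) is (1,1) itself or Reach from (1,2)
lemma reach11_cases {p : Int × Int} (h : Reach (1, 1) p) : p = (1, 1) ∨ Reach (1, 2) p := by
  cases h with
  | refl => exact Or.inl rfl
  | head _ _ h => right; simpa using h

-- is_consec_fib f num decides whether num is the successor fib of f
lemma is_consec_fib_eq {f g num : Int} (hr : Reach (1, 2) (f, g)) (hlt : f < num) :
    is_consec_fib f num = true ↔ num = g := by
  obtain ⟨hf1, hfg⟩ := reach12_inv hr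
  unfold is_consec_fib
  rw [fibLoopA_iff]
  constructor
  · rintro ⟨⟨x, y⟩, hp, hle, hm⟩
    rcases reach11_cases hp with h11 | h12
    · simp at h11; simp at hm; omega
    · obtain ⟨hx1, hxy⟩ := reach_inv (p := (1, 2)) (by norm_num) (by norm_num) h12
      simp at hx1 hxy
      rcases hm with ⟨hxf, hyn⟩ | ⟨hxn, hyf⟩
      · subst hxf hyn
        exact (reach_uniq hr h12).symm
      · simp at hxn hyf; omega
  · intro h
    subst h
    refine ⟨(f, num), Reach.head (1, 1) (f, num) (by norm_num; exact hr), by omega, Or.inl ⟨rfl, rfl⟩⟩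

-- transfer an existential over Reach across one step of the chain
lemma reach_shift {a b : Int} {P : Int × Int → Prop} (hne : ¬ P (a, b)) :
    (∃ p, Reach (a, b) p ∧ P p) ↔ (∃ p, Reach (b, a + b) p ∧ P p) := by
  constructor
  · rintro ⟨p, hr, hp⟩
    cases hr with
    | refl => exact absurd hp hne
    | head _ _ h => exact ⟨p, by simpa using h, hp⟩
  · rintro ⟨p, hr, hp⟩
    exact ⟨p, Reach.head (a, b) p (by simpa using hr), hp⟩

-- unfolding equations for fibGen
lemma fibGen_cons {n a b : Int} (h1 : 1 ≤ a) (h2 : a < b) (h : a ≤ n) :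
    fibGen n a b h1 h2 = a :: fibGen n b (a + b) (by omega) (by omega) := by
  rw [fibGen]; simp [h]

lemma fibGen_nil {n a b : Int} (h1 : 1 ≤ a) (h2 : a < b) (h : ¬ a ≤ n) :
    fibGen n a b h1 h2 = [] := by
  rw [fibGen]; simp [h]

-- membership in B's generated Fibonacci list
lemma mem_fibGen {x : Int} (n a b : Int) (h1 : 1 ≤ a) (h2 : a < b) :
    x ∈ fibGen n a b h1 h2 ↔ ∃ p, Reach (a, b) p ∧ p.1 = x ∧ x ≤ n := by
  fun_induction fibGen with
  | case1 a b h1 h2 hle ih =>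
      simp only [List.mem_cons, ih]
      constructor
      · rintro (rfl | ⟨p, hr, hp⟩)
        · exact ⟨(x, b), Reach.refl _, rfl, hle⟩
        · exact ⟨p, Reach.head (a, b) p hr, hp⟩
      · rintro ⟨p, hr, hpx, hxn⟩
        cases hr with
        | refl => left; simp at hpx; omega
        | head _ _ h => right; exact ⟨p, h, hpx, hxn⟩
  | case2 a b h1 h2 hgt =>
      simp only [List.not_mem_nil, false_iff]
      rintro ⟨p, hr, hpx, hxn⟩
      have := reach_mono (p := (a, b)) (by simpa) (by simp; omega) hr
      omega

lemma fibGen_succ_mem (k a b : Int) (h1 : 1 ≤ a) (h2 : a < b)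
    (h : ∃ p, Reach (a, b) p ∧ p.1 = k + 1) :
    fibGen (k + 1) a b h1 h2 = fibGen k a b h1 h2 ++ [k + 1] := by
  by_cases hak : a ≤ k
  · have h' : ∃ p, Reach (b, a + b) p ∧ p.1 = k + 1 := by
      rw [← reach_shift (P := fun p => p.1 = k + 1) (by simp; omega)]; exact h
    have ih := fibGen_succ_mem k b (a + b) (by omega) (by omega) h'
    rw [fibGen_cons h1 h2 (show a ≤ k + 1 by omega), fibGen_cons h1 h2 hak, ih]
    simp
  · by_cases hak1 : a = k + 1
    · subst hak1
      rw [fibGen_cons h1 h2 (le_refl _), fibGen_nil (by omega) (by omega) (show ¬ b ≤ k + 1 by omega),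
          fibGen_nil h1 h2 hak]
      simp
    · exfalso
      obtain ⟨p, hr, hp⟩ := h
      have := reach_mono (p := (a, b)) (by simpa) (by simp; omega) hr
      omega
termination_by (k + 1 - a).toNat
decreasing_by omega

lemma fibGen_succ_not (k a b : Int) (h1 : 1 ≤ a) (h2 : a < b)
    (h : ¬ ∃ p, Reach (a, b) p ∧ p.1 = k + 1) :
    fibGen (k + 1) a b h1 h2 = fibGen k a b h1 h2 := by
  by_cases hak : a ≤ k
  · have h' : ¬ ∃ p, Reach (b, a + b) p ∧ p.1 = k + 1 := by
      rw [← reach_shift (P := fun p => p.1 = k + 1) (by simp; omega)]; exact h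
    have ih := fibGen_succ_not k b (a + b) (by omega) (by omega) h'
    rw [fibGen_cons h1 h2 (show a ≤ k + 1 by omega), fibGen_cons h1 h2 hak, ih]
  · by_cases hak1 : a = k + 1
    · exact absurd ⟨(a, b), Reach.refl _, hak1⟩ h
    · rw [fibGen_nil h1 h2 (show ¬ a ≤ k + 1 by omega), fibGen_nil h1 h2 hak]
termination_by (k + 1 - a).toNat
decreasing_by omega

-- no number strictly between two consecutive chain pairs is a chain value
lemma not_fib_between {f g k : Int} (hr : Reach (1, 2) (f, g)) (hf : f ≤ k) (hg : k + 1 < g) :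
    ¬ ∃ p, Reach (1, 2) p ∧ p.1 = k + 1 := by
  rintro ⟨p, hp, hpx⟩
  obtain ⟨hp1, hp2⟩ := reach_inv (p := (1, 2)) (by norm_num) (by norm_num) hp
  obtain ⟨hf1, hfg⟩ := reach12_inv hr
  rcases reach_total hr hp with h | h
  · rcases reach_strict (p := (f, g)) (by simpa) (by simpa) h with h' | h'
    · rw [← h'] at hpx; simp at hpx; omega
    · simp at h'; omega
  · have := reach_mono (p := p) (by omega) (by omega) h
    simp at this; omega

-- Set membership bridge for B's sec2 filter
lemma contains_ofList (l : List Int) (x : Int) :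
    (PySem.Set.ofList l).contains x = true ↔ x ∈ l := by
  simp [PySem.Set.contains, PySem.Set.mem_ofList]

lemma contains_fibGen_true (n x : Int) (hx : x ≤ n)
    (h : ∃ p, Reach (1, 2) p ∧ p.1 = x) :
    (PySem.Set.ofList (fibGen n 1 2 (by omega) (by omega))).contains x = true := by
  obtain ⟨p, hp, hpx⟩ := h
  exact (contains_ofList _ _).mpr ((mem_fibGen n 1 2 (by omega) (by omega)).mpr ⟨p, hp, hpx, hx⟩)

lemma contains_fibGen_false (n x : Int)
    (h : ¬ ∃ p, Reach (1, 2) p ∧ p.1 = x) :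
    (PySem.Set.ofList (fibGen n 1 2 (by omega) (by omega))).contains x = false := by
  cases hC : (PySem.Set.ofList (fibGen n 1 2 (by omega) (by omega))).contains x with
  | false => rfl
  | true =>
      obtain ⟨p, hp, hpx, -⟩ :=
        (mem_fibGen n 1 2 (by omega) (by omega)).mp ((contains_ofList _ _).mp hC)
      exact absurd ⟨p, hp, hpx⟩ h

-- A's loop state after processing 1..k equals B's data
lemma mainInv (n k : Int) (hk : 1 ≤ k) (hkn : k ≤ n) :
    ∃ f g, Reach (1, 2) (f, g) ∧ f ≤ k ∧ k < g ∧
      (PySem.List.pyRange 1 (k + 1) 1).foldl stepA ([], [], none) =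
        (fibGen k 1 2 (by omega) (by omega),
         (PySem.List.pyRange 1 (k + 1) 1).filter
           (fun x => !((PySem.Set.ofList (fibGen n 1 2 (by omega) (by omega))).contains x)),
         some f) := by
  revert hkn
  induction k, hk using Int.le_induction with
  | base =>
      intro h1n
      refine ⟨1, 2, Reach.refl _, le_refl _, by omega, ?_⟩
      rw [PySem.List.pyRange_one_singleton, fibGen_cons (by omega) (by omega) (le_refl _),
          fibGen_nil (by omega) (by omega) (by omega)]
      simp only [List.foldl_cons, List.foldl_nil, List.filter_cons, List.filter_nil,
        contains_fibGen_true n 1 h1n ⟨(1, 2), Reach.refl _, rfl⟩, stepA]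
      simp
  | succ k hk ih =>
      intro h
      obtain ⟨f, g, hr, hfk, hkg, heq⟩ := ih (by omega)
      obtain ⟨hf1, hfg⟩ := reach12_inv hr
      have hicf := is_consec_fib_eq hr (show f < k + 1 by omega)
      rw [PySem.List.pyRange_one_succ_right (show (1 : Int) ≤ k + 1 by omega),
          List.foldl_append, heq, List.filter_append]
      simp only [List.foldl_cons, List.foldl_nil, List.filter_cons, List.filter_nil]
      by_cases hg : k + 1 = g
      · have ht : is_consec_fib f (k + 1) = true := hicf.mpr hg
        have hex : ∃ p, Reach (1, 2) p ∧ p.1 = k + 1 := ⟨(g, f + g), reach_tail hr, hg.symm⟩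
        refine ⟨g, f + g, reach_tail hr, by omega, by omega, ?_⟩
        rw [fibGen_succ_mem k 1 2 (by omega) (by omega) hex]
        simp only [contains_fibGen_true n (k + 1) h hex, stepA, ht, if_true,
          Bool.not_true, Bool.false_eq_true]
        simp [hg]
      · have hnex := not_fib_between hr hfk (by omega)
        have hf : is_consec_fib f (k + 1) = false := by
          cases h' : is_consec_fib f (k + 1) with
          | false => rfl
          | true => exact absurd (hicf.mp h') hg
        refine ⟨f, g, hr, by omega, by omega, ?_⟩
        rw [fibGen_succ_not k 1 2 (by omega) (by omega) hnex]
        simp only [contains_fibGen_false n (k + 1) hnex, stepA, hf,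
          Bool.not_false, Bool.false_eq_true, if_false]
        simp

-- ===== VERDICT (by name: the statement is the Claim_ definition above) =====
theorem assign_sections_spec : Claim_equal_assign_sections := by
  intro n _
  unfold Spec_assign_sections assign_sections assign_sections_alt
  by_cases hn : 1 ≤ n
  · obtain ⟨f, g, -, -, -, heq⟩ := mainInv n n hn (le_refl _)
    rw [heq]
  · rw [PySem.List.pyRange_one_eq_nil (by omega), fibGen_nil (by omega) (by omega) hn]
    simp
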